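-- pv_equiv track=rewrite | github.com/oracle/graalpython | graalpython/benchmarks/src/micro/generator-notaligned.py | call_generator
-- ===== SOURCE A (Python) =====
-- def generator(n):
--     for i in range(n):
--         yield i * 2
--
-- def call_generator(num, iteration):
--     item = 0
--     for t in range(iteration):
--         num += t % 5
--         gen = generator(num)
--         for i in gen:
--             item = i + item % 5
--
--     return item
-- ===== SOURCE B (Python) =====
-- def call_generator(num, iteration):
--     # num after outer step t=k-1 is num0 + sum_{t<k} t%5 = num0 + 10*(k//5) + r*(r-1)//2, r=k%5,
--     # and the inner generator loop collapses to a closed form in that value and item%5.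
--     item = 0
--     k = 1
--     while k <= iteration:
--         q, r = divmod(k, 5)
--         n = num + 10 * q + r * (r - 1) // 2
--         if n >= 1:
--             item = 2 * (n - 1) + (item % 5 + (n - 1) * (n - 2)) % 5
--         k += 1
--     return item
-- ===== Notes on version B (the rewrite author's own statement) =====
-- stated objective: faster
-- what changed: B drops the running num accumulator (num at outer step k is computed in closed form from k via divmod, since sum of t%5 over a range is 10*(k//5)+r*(r-1)//2) and collapses the whole inner generator loop to an O(1) closed form, a while loop over a single item state.
import Mathlib
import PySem

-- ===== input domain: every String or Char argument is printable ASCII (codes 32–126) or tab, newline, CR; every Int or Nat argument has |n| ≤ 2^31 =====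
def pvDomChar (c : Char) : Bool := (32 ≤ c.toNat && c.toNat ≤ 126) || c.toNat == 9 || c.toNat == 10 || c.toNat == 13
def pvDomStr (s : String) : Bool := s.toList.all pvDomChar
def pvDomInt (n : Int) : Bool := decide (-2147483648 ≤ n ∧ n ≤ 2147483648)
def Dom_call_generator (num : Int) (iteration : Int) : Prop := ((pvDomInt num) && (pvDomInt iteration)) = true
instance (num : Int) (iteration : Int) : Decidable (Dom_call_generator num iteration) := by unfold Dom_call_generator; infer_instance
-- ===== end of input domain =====

-- B drops the running num accumulator (closed form via divmod) and collapses the inner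
-- generator loop to O(1) per step (faster: O(iteration) vs O(iteration*num)).

-- ===== PORT A =====
def call_generator (num : Int) (iteration : Int) : Int :=
  -- state (num, item); 'gen' is the list of values the generator yields (i * 2 for i in range(num))
  (((PySem.List.pyRange 0 iteration 1).foldl
    (fun (st : Int × Int) t =>
      let num' := st.1 + PySem.Int.mod t 5
      let gen := (PySem.List.pyRange 0 num' 1).map (fun i => i * 2)
      let item := gen.foldl (fun item i => i + PySem.Int.mod item 5) st.2
      (num', item)) (num, 0)) : Int × Int).2

-- ===== PORT B =====
-- one step of Source B's while-loop body at counter k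
def cgStep (num : Int) (k : Int) (item : Int) : Int :=
  let q := PySem.Int.floordiv k 5
  let r := PySem.Int.mod k 5
  let n := num + 10 * q + PySem.Int.floordiv (r * (r - 1)) 2
  if n ≥ 1 then 2 * (n - 1) + PySem.Int.mod (PySem.Int.mod item 5 + (n - 1) * (n - 2)) 5
  else item

-- Source B's while loop 'while k <= iteration', as recursion on the remaining trip count
def cgGo (num : Int) (fuel : Nat) (k : Int) (item : Int) : Int :=
  match fuel with
  | 0 => item
  | f + 1 => cgGo num f (k + 1) (cgStep num k item)

def call_generator_alt (num : Int) (iteration : Int) : Int :=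
  cgGo num iteration.toNat 1 0

-- ===== PRECONDITION & SPEC =====
def Spec_call_generator (num : Int) (iteration : Int) (out : Int) : Prop := out = call_generator_alt num iteration
instance (num : Int) (iteration : Int) (out : Int) : Decidable (Spec_call_generator num iteration out) := by unfold Spec_call_generator; infer_instance

-- ===== CLAIM (what is proved, stated in full; the proofs are below) =====
def Claim_equal_call_generator : Prop := ∀ (num : Int) (iteration : Int), Dom_call_generator num iteration → Spec_call_generator num iteration (call_generator num iteration)

-- ===== LEMMAS AND PROOFS =====

-- the inner generator fold over range n, written with Nat length
lemma pv_inner_nat (n : Nat) (x : Int) :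
    (((PySem.List.pyRange 0 (n : Int) 1).map (fun i => i * 2)).foldl
      (fun item i => i + PySem.Int.mod item 5) x)
    = if (n : Int) ≥ 1 then
        2 * ((n : Int) - 1) + (x % 5 + ((n : Int) - 1) * ((n : Int) - 2)) % 5
      else x := by
  induction n with
  | zero => simp [PySem.List.pyRange_one_eq_nil (by omega : (0:Int) ≤ 0)]
  | succ n ih =>
    rw [show ((n + 1 : Nat) : Int) = (n : Int) + 1 by push_cast; ring,
        PySem.List.pyRange_one_succ_right (by exact_mod_cast Nat.zero_le n : (0:Int) ≤ (n : Int)),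
        List.map_append, List.foldl_append, ih]
    simp only [List.map_cons, List.map_nil, List.foldl_cons, List.foldl_nil]
    rw [PySem.Int.mod_eq_emod_of_pos (by omega : (0:Int) < 5)]
    by_cases h : (n : Int) ≥ 1
    · rw [if_pos h, if_pos (by omega)]
      have hq : ((n : Int) + 1 - 1) * ((n : Int) + 1 - 2)
          = 2 * ((n : Int) - 1) + ((n : Int) - 1) * ((n : Int) - 2) := by ring
      rw [hq]
      generalize ((n : Int) - 1) * ((n : Int) - 2) = p
      omega
    · have hn : (n : Int) = 0 := by omega
      rw [if_neg h, if_pos (by omega), hn]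
      norm_num

-- the inner fold, for any Int bound
lemma pv_inner (m : Int) (x : Int) :
    (((PySem.List.pyRange 0 m 1).map (fun i => i * 2)).foldl
      (fun item i => i + PySem.Int.mod item 5) x)
    = if m ≥ 1 then
        2 * (m - 1) + (x % 5 + (m - 1) * (m - 2)) % 5
      else x := by
  by_cases hm : m ≤ 0
  · rw [PySem.List.pyRange_one_eq_nil hm, if_neg (by omega)]
    simp
  · have : m = ((m.toNat : Nat) : Int) := by omega
    rw [this]; exact pv_inner_nat m.toNat x

-- cumulative sum of t % 5 for t < k  (the value A's num accumulator has gained)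
def cgS : Nat → Int
  | 0 => 0
  | k + 1 => cgS k + PySem.Int.mod (k : Int) 5

-- B's closed form for num at counter k equals num + cgS k
lemma cg_closed (k : Nat) :
    10 * PySem.Int.floordiv (k : Int) 5
      + PySem.Int.floordiv (PySem.Int.mod (k : Int) 5 * (PySem.Int.mod (k : Int) 5 - 1)) 2
    = cgS k := by
  induction k with
  | zero => decide
  | succ k ih =>
    rw [cgS, ← ih]
    rw [PySem.Int.mod_eq_emod_of_pos (by omega : (0:Int) < 5),
        PySem.Int.mod_eq_emod_of_pos (by omega : (0:Int) < 5),
        PySem.Int.floordiv_eq_ediv_of_pos (by omega : (0:Int) < 5),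
        PySem.Int.floordiv_eq_ediv_of_pos (by omega : (0:Int) < 5)]
    set m : Int := (k : Int) with hm
    have hk1 : ((k + 1 : Nat) : Int) = m + 1 := by push_cast; ring
    rw [hk1]
    have h0 : 0 ≤ m := by rw [hm]; exact Int.natCast_nonneg k
    have h5 : m % 5 = 0 ∨ m % 5 = 1 ∨ m % 5 = 2 ∨ m % 5 = 3 ∨ m % 5 = 4 := by omega
    rcases h5 with h | h | h | h | h <;>
    · have h' : (m + 1) % 5 = (m % 5 + 1) % 5 := by omega
      rw [h'] at *
      rw [h]
      norm_num
      omega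

-- unrolling Source B's loop at the right end
lemma cgGo_succ_right (num : Int) (f : Nat) (k item : Int) :
    cgGo num (f + 1) k item = cgStep num (k + f) (cgGo num f k item) := by
  induction f generalizing k item with
  | zero => simp [cgGo]
  | succ f ih =>
    rw [show f + 1 + 1 = (f + 1) + 1 from rfl, cgGo, ih, cgGo]
    have hx : k + 1 + (f : Int) = k + ((f + 1 : Nat) : Int) := by push_cast; ring
    rw [hx]

-- main invariant: A's fold over range n has num-component num + cgS n and item-component cgGo … n
lemma cg_main (num : Int) (n : Nat) :
    ((PySem.List.pyRange 0 (n : Int) 1).foldl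
      (fun (st : Int × Int) t =>
        let num' := st.1 + PySem.Int.mod t 5
        let gen := (PySem.List.pyRange 0 num' 1).map (fun i => i * 2)
        let item := gen.foldl (fun item i => i + PySem.Int.mod item 5) st.2
        (num', item)) (num, 0))
    = (num + cgS n, cgGo num n 1 0) := by
  induction n with
  | zero =>
    rw [show ((0 : Nat) : Int) = 0 from rfl, PySem.List.pyRange_one_eq_nil (by omega)]
    simp [cgGo, cgS]
  | succ n ih =>
    rw [show ((n + 1 : Nat) : Int) = (n : Int) + 1 by push_cast; ring,
        PySem.List.pyRange_one_succ_right (by exact_mod_cast Nat.zero_le n : (0:Int) ≤ (n : Int)),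
        List.foldl_append, ih]
    simp only [List.foldl_cons, List.foldl_nil, Prod.mk.injEq]
    refine ⟨?_, ?_⟩
    · show num + cgS n + PySem.Int.mod (n : Int) 5 = num + cgS (n + 1)
      rw [cgS]; ring
    · show (((PySem.List.pyRange 0 (num + cgS n + PySem.Int.mod (n : Int) 5) 1).map (fun i => i * 2)).foldl
          (fun item i => i + PySem.Int.mod item 5) (cgGo num n 1 0)) = cgGo num (n + 1) 1 0
      rw [cgGo_succ_right num n 1 0, pv_inner]
      unfold cgStep
      simp only [show ∀ a : Int, PySem.Int.mod a 5 = a % 5 from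
        fun a => PySem.Int.mod_eq_emod_of_pos (by omega)]
      have hS : cgS (n + 1) = cgS n + (n : Int) % 5 := by
        rw [cgS, PySem.Int.mod_eq_emod_of_pos (by omega : (0:Int) < 5)]
      have hc := cg_closed (n + 1)
      rw [show ((n + 1 : Nat) : Int) = 1 + (n : Int) by push_cast; ring,
          PySem.Int.mod_eq_emod_of_pos (by omega : (0:Int) < 5)] at hc
      have key : num + cgS n + (n : Int) % 5
          = num + 10 * PySem.Int.floordiv (1 + (n : Int)) 5
            + PySem.Int.floordiv ((1 + (n : Int)) % 5 * ((1 + (n : Int)) % 5 - 1)) 2 := by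
        linarith [hc, hS]
      rw [key]

-- ===== VERDICT (by name: the statement is the Claim_ definition above) =====
theorem call_generator_spec : Claim_equal_call_generator := by
  intro num iteration _
  unfold Spec_call_generator call_generator call_generator_alt
  by_cases h : iteration ≤ 0
  · rw [PySem.List.pyRange_one_eq_nil h]
    have : iteration.toNat = 0 := by omega
    rw [this]
    rfl
  · have : iteration = ((iteration.toNat : Nat) : Int) := by omega
    conv_lhs => rw [this]
    rw [cg_main]
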